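-- pv_equiv track=rewrite | github.com/janghana/Machine-Learning | practice.py | func
-- ===== SOURCE A (Python) =====
-- from itertools import combinations
--
-- def func(data, num):
--     result = []
--     for i in range(0, len(data)):
--         result.append(data[i])
--
--     if len(data) - num == 0 or len(data) - num == 1:
--         return "True"
--
--     for f in range(0, num):
--         combi = list(combinations(result, len(result)-num+f))
--         for i in combi:
--             k = 1
--             for j in range(0,len(i)):
--                 if i[j] != i[len(i)-k]:
--                     break;
--                 elif (len(i) - k) == (len(i)//2):
--                     return "True"
--                 elif i[j] == i[len(i) - k]:
--                     k += 1
--                     continue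
--     return "False"
-- ===== SOURCE B (Python) =====
-- def func(data, num):
--     n = len(data)
--     if n - num == 0 or n - num == 1:
--         return "True"
--     if num <= 0:
--         return "False"
--     # longest palindromic subsequence via memoized interval recursion
--     memo = {}
--     def lps(i, j):
--         if j < i:
--             return 0
--         if i == j:
--             return 1
--         key = (i, j)
--         if key in memo:
--             return memo[key]
--         if data[i] == data[j]:
--             v = lps(i + 1, j - 1) + 2
--         else:
--             v = max(lps(i + 1, j), lps(i, j - 1))
--         memo[key] = v
--         return v
--     return "True" if lps(0, n - 1) >= n - num else "False"
-- ===== Notes on version B (the rewrite author's own statement) =====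
-- stated objective: faster
-- what changed: Replaced the exponential scan of all combinations of every length in [n-num, n-1] by an O(n^2) longest-palindromic-subsequence interval recursion (memoized), answering True iff LPS(data) >= n-num.
import Mathlib
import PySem

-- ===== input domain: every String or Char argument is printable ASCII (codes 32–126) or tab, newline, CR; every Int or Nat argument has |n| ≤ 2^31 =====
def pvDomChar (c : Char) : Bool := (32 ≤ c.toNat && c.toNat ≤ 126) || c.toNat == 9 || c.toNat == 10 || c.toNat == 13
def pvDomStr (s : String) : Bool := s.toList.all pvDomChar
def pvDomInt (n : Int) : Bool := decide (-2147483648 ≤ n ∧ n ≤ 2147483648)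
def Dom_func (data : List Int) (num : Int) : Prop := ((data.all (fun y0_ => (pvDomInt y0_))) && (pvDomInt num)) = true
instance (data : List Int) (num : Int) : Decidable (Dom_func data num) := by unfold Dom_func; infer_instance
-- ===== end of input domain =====

-- B replaces A's exponential scan over all combinations by an O(n^2) longest-palindromic-subsequence
-- recursion; equivalence is proved for num ≤ len(data) (elsewhere A raises ValueError).

-- ===== PORT A =====
-- inner 'for j' loop of A: scan with indices j (from the front) and len-k (from the back), k = j+1
def palScan (l : List Int) (j k : Nat) : Bool :=
  if j < l.length then
    if PySem.List.pyGetD l (j : Int) 0 ≠ PySem.List.pyGetD l ((l.length : Int) - (k : Int)) 0 then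
      false
    else if (l.length : Int) - (k : Int) = PySem.Int.floordiv (l.length : Int) 2 then
      true
    else
      palScan l (j + 1) (k + 1)
  else false
termination_by l.length - j

def func (data : List Int) (num : Int) : String :=
  let result := (PySem.List.pyRange 0 (data.length : Int) 1).foldl
    (fun acc i => acc ++ [PySem.List.pyGetD data i 0]) []
  if (data.length : Int) - num = 0 ∨ (data.length : Int) - num = 1 then "True"
  else if (PySem.List.pyRange 0 num 1).any (fun f =>
      (PySem.List.combinations result (((result.length : Int) - num + f).toNat)).any
        (fun c => palScan c 0 1)) then "True"
  else "False"

-- ===== PORT B =====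
-- Source B's lps(i, j): longest palindromic subsequence of data[i..j] (memo in Python is pure caching)
def lpsAux (data : List Int) (i j : Nat) : Int :=
  if j < i then 0
  else if i = j then 1
  else if data.getD i 0 = data.getD j 0 then lpsAux data (i + 1) (j - 1) + 2
  else max (lpsAux data (i + 1) j) (lpsAux data i (j - 1))
termination_by j + 1 - i
decreasing_by all_goals omega

def func_alt (data : List Int) (num : Int) : String :=
  if (data.length : Int) - num = 0 ∨ (data.length : Int) - num = 1 then "True"
  else if num ≤ 0 then "False"
  else if lpsAux data 0 (data.length - 1) ≥ (data.length : Int) - num then "True"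
  else "False"

-- ===== PRECONDITION & SPEC =====
-- Pre_ excludes exactly num > len(data), where A raises ValueError (combinations with negative r)
def Pre_func (data : List Int) (num : Int) : Prop := num ≤ (data.length : Int)
instance (data : List Int) (num : Int) : Decidable (Pre_func data num) := by
  unfold Pre_func; infer_instance

def pvWitness_func : List Int × Int := ([1, 2, 1, 3], 2)

def Spec_func (data : List Int) (num : Int) (out : String) : Prop := out = func_alt data num
instance (data : List Int) (num : Int) (out : String) : Decidable (Spec_func data num out) := by
  unfold Spec_func; infer_instance

-- ===== CLAIM (what is proved, stated in full; the proofs are below) =====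
def Claim_equal_func : Prop := ∀ (data : List Int) (num : Int),
  Dom_func data num → Pre_func data num → Spec_func data num (func data num)

-- ===== LEMMAS AND PROOFS =====

-- the segment data[i..j] as a list
def seg (data : List Int) (i j : Nat) : List Int := (data.drop i).take (j + 1 - i)

theorem seg_empty (data : List Int) {i j : Nat} (h : j < i) : seg data i j = [] := by
  have h0 : j + 1 - i = 0 := by omega
  simp [seg, h0]

theorem segL (data : List Int) {i j : Nat} (hij : i ≤ j) (hj : i < data.length) :
    seg data i j = data[i] :: seg data (i + 1) j := by
  have h1 : j + 1 - i = (j - i) + 1 := by omega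
  have h2 : j + 1 - (i + 1) = j - i := by omega
  rw [seg, seg, h1, h2, List.drop_eq_getElem_cons hj, List.take_succ_cons]

theorem seg_single (data : List Int) {i : Nat} (h : i < data.length) :
    seg data i i = [data[i]] := by
  rw [segL data (Nat.le_refl i) h, seg_empty data (Nat.lt_succ_self i)]

theorem segR (data : List Int) {i j : Nat} (hij : i ≤ j) (h1 : 1 ≤ j) (hj : j < data.length) :
    seg data i j = seg data i (j - 1) ++ [data[j]] := by
  have hlen : j - i < (data.drop i).length := by simp; omega
  have h2 : j + 1 - i = (j - i) + 1 := by omega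
  have h3 : (j - 1) + 1 - i = j - i := by omega
  rw [seg, seg, h2, h3, List.take_succ, List.getElem?_drop,
    List.getElem?_eq_getElem (by omega)]
  simp; congr 1; omega

theorem seg_decomp (data : List Int) {i j : Nat} (hij : i < j) (hj : j < data.length) :
    seg data i j = data[i] :: (seg data (i + 1) (j - 1) ++ [data[j]]) := by
  rw [segL data (by omega) (by omega), segR data (by omega) (by omega) hj]

theorem seg_full (data : List Int) (h : data ≠ []) :
    seg data 0 (data.length - 1) = data := by
  have : data.length - 1 + 1 - 0 = data.length := by
    have := List.length_pos_iff.mpr h; omega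
  simp [seg, this]

-- result list built by A's first loop equals data
theorem result_eq (data : List Int) :
    (PySem.List.pyRange 0 (data.length : Int) 1).foldl
      (fun acc i => acc ++ [PySem.List.pyGetD data i 0]) [] = data := by
  rw [PySem.List.foldl_pyRange_zero_pyGetD' data 0 (fun acc x => acc ++ [x]) []]
  suffices h : ∀ (l acc : List Int), l.foldl (fun a x => a ++ [x]) acc = acc ++ l by
    simpa using h data []
  intro l
  induction l with
  | nil => simp
  | cons x xs ih => intro acc; rw [List.foldl_cons, ih]; simp

theorem strip_head {c x : Int} {t m : List Int} (h : (c :: t).Sublist (x :: m)) :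
    t.Sublist m := by
  rcases List.sublist_cons_iff.mp h with h' | ⟨r, he, hr⟩
  · exact (List.sublist_cons_self c t).trans h'
  · injection he with h1 h2; subst h2; exact hr

theorem strip_last {c y : Int} {t m : List Int} (h : (t ++ [c]).Sublist (m ++ [y])) :
    t.Sublist m := by
  have h2 : (c :: t.reverse).Sublist (y :: m.reverse) := by
    have := h.reverse; simpa using this
  have := (strip_head h2).reverse
  simpa using this

theorem pal_getLast? {s : List Int} (hp : s.Palindrome) : s.getLast? = s.head? := by
  rw [← List.head?_reverse, hp.reverse_eq]

-- lower bound: lpsAux is achieved by a palindromic sublist of the segment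
theorem lps_achieved (data : List Int) : ∀ (i j : Nat), j < data.length →
    ∃ s : List Int, s.Sublist (seg data i j) ∧ s.Palindrome ∧ (s.length : Int) = lpsAux data i j := by
  intro i j
  induction i, j using lpsAux.induct data with
  | case1 i j h =>
    intro hj
    exact ⟨[], by rw [seg_empty data h], List.Palindrome.nil,
      by rw [lpsAux, if_pos h]; simp⟩
  | case2 i h1 =>
    intro hi
    refine ⟨[data[i]], ?_, List.Palindrome.singleton _, ?_⟩
    · rw [seg_single data hi]
    · rw [lpsAux, if_neg h1, if_pos rfl]; simp
  | case3 i j h1 h2 h3 ih =>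
    intro hj
    have hij : i < j := by omega
    obtain ⟨s, hs, hp, hl⟩ := ih (by omega)
    have ha : data[i]'(by omega) = data[j]'hj := by
      rw [← List.getD_eq_getElem data 0 (by omega), ← List.getD_eq_getElem data 0 hj]
      exact h3
    refine ⟨data[i]'(by omega) :: (s ++ [data[i]'(by omega)]), ?_,
      List.Palindrome.cons_concat _ hp, ?_⟩
    · rw [seg_decomp data hij hj]
      refine List.Sublist.cons₂ _ (hs.append ?_)
      rw [ha]
    · rw [lpsAux, if_neg h1, if_neg h2, if_pos h3]
      simp only [List.length_cons, List.length_append, List.length_nil]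
      push_cast
      omega
  | case4 i j h1 h2 h3 ih1 ih2 =>
    intro hj
    have hij : i < j := by omega
    have e0 : seg data i j = data[i]'(by omega) :: seg data (i + 1) j :=
      segL data (by omega) (by omega)
    have e1 : (seg data (i + 1) j).Sublist (seg data i j) := by
      rw [e0]; exact List.sublist_cons_self _ _
    have e0' : seg data i j = seg data i (j - 1) ++ [data[j]'hj] :=
      segR data (by omega) (by omega) hj
    have e2 : (seg data i (j - 1)).Sublist (seg data i j) := by
      rw [e0']; exact List.sublist_append_left _ _
    obtain ⟨s1, hs1, hp1, hl1⟩ := ih1 hj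
    obtain ⟨s2, hs2, hp2, hl2⟩ := ih2 (by omega)
    rcases le_total (lpsAux data (i + 1) j) (lpsAux data i (j - 1)) with hle | hle
    · refine ⟨s2, hs2.trans e2, hp2, ?_⟩
      rw [lpsAux, if_neg h1, if_neg h2, if_neg h3, max_eq_right hle]
      exact hl2
    · refine ⟨s1, hs1.trans e1, hp1, ?_⟩
      rw [lpsAux, if_neg h1, if_neg h2, if_neg h3, max_eq_left hle]
      exact hl1

-- upper bound: every palindromic sublist of the segment has length ≤ lpsAux
theorem lps_upper (data : List Int) : ∀ (i j : Nat), j < data.length →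
    ∀ s : List Int, s.Sublist (seg data i j) → s.Palindrome →
      (s.length : Int) ≤ lpsAux data i j := by
  intro i j
  induction i, j using lpsAux.induct data with
  | case1 i j h =>
    intro hj s hs hp
    rw [seg_empty data h] at hs
    have hnil := List.sublist_nil.mp hs
    rw [lpsAux, if_pos h, hnil]
    simp
  | case2 i h1 =>
    intro hi s hs hp
    rw [seg_single data hi] at hs
    have hle : s.length ≤ 1 := by simpa using hs.length_le
    rw [lpsAux, if_neg h1, if_pos rfl]
    omega
  | case3 i j h1 h2 h3 ih =>
    intro hj s hs hp
    have hij : i < j := by omega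
    rw [lpsAux, if_neg h1, if_neg h2, if_pos h3]
    have hnn : 0 ≤ lpsAux data (i + 1) (j - 1) := by
      obtain ⟨s0, -, -, hl0⟩ := lps_achieved data (i + 1) (j - 1) (by omega)
      omega
    rw [seg_decomp data hij hj] at hs
    cases hp with
    | nil => simp; omega
    | singleton x => simp; omega
    | cons_concat x hpt =>
      have h5 := strip_head hs
      have h6 := strip_last h5
      have h7 := ih (by omega) _ h6 hpt
      simp only [List.length_cons, List.length_append, List.length_nil]
      push_cast
      omega
  | case4 i j h1 h2 h3 ih1 ih2 =>
    intro hj s hs hp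
    have hij : i < j := by omega
    rw [lpsAux, if_neg h1, if_neg h2, if_neg h3]
    have hseg1 : seg data (i + 1) j = seg data (i + 1) (j - 1) ++ [data[j]'hj] :=
      segR data (by omega) (by omega) hj
    have hseg2 : seg data i (j - 1) = data[i]'(by omega) :: seg data (i + 1) (j - 1) :=
      segL data (by omega) (by omega)
    rw [seg_decomp data hij hj] at hs
    rcases List.sublist_cons_iff.mp hs with hcase | ⟨r, rfl, hr⟩
    · have := ih1 hj s (by rw [hseg1]; exact hcase) hp
      exact le_trans this (le_max_left _ _)
    · rcases List.sublist_append_iff.mp hr with ⟨r1, r2, hre, hr1, hr2⟩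
      have hr2' : r2 = [] ∨ r2 = [data[j]'hj] := by
        rcases List.sublist_cons_iff.mp hr2 with h' | ⟨r', he', hr'⟩
        · exact Or.inl (List.sublist_nil.mp h')
        · rw [List.sublist_nil.mp hr'] at he'
          exact Or.inr he'
      rcases hr2' with rfl | rfl
      · rw [List.append_nil] at hre
        have hsub2 : (data[i]'(by omega) :: r).Sublist (seg data i (j - 1)) := by
          rw [hseg2, hre]
          exact hr1.cons₂ _
        have := ih2 (by omega) _ hsub2 hp
        exact le_trans this (le_max_right _ _)
      · exfalso
        have hlast1 : (data[i]'(by omega) :: r).getLast? = some (data[i]'(by omega)) := by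
          rw [pal_getLast? hp]; rfl
        rw [hre, show data[i]'(by omega) :: (r1 ++ [data[j]'hj]) =
          (data[i]'(by omega) :: r1) ++ [data[j]'hj] from rfl, List.getLast?_concat] at hlast1
        have : data.getD i 0 = data.getD j 0 := by
          rw [List.getD_eq_getElem data 0 (by omega), List.getD_eq_getElem data 0 hj]
          exact (Option.some.inj hlast1).symm
        exact h3 this

-- a palindrome has palindromic sublists of every smaller length
theorem pal_shrink : ∀ {s : List Int}, s.Palindrome → ∀ L ≤ s.length,
    ∃ t : List Int, t.Sublist s ∧ t.Palindrome ∧ t.length = L := by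
  intro s hp
  induction hp with
  | nil =>
    intro L hL
    have : L = 0 := by simpa using hL
    exact ⟨[], by simp, List.Palindrome.nil, this ▸ rfl⟩
  | singleton a =>
    intro L hL
    match L, hL with
    | 0, _ => exact ⟨[], by simp, List.Palindrome.nil, rfl⟩
    | 1, _ => exact ⟨[a], List.Sublist.refl _, List.Palindrome.singleton a, rfl⟩
  | @cons_concat x l hpl ih =>
    intro L hL
    have hlen : (x :: (l ++ [x])).length = l.length + 2 := by simp
    by_cases h1 : L ≤ l.length
    · obtain ⟨t, hts, htp, htl⟩ := ih L h1
      exact ⟨t, ((hts.trans (List.sublist_append_left l [x])).cons x), htp, htl⟩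
    · by_cases h2 : L = l.length + 2
      · exact ⟨x :: (l ++ [x]), List.Sublist.refl _, List.Palindrome.cons_concat x hpl, by
          simp [h2]⟩
      · have h3 : L = l.length + 1 := by rw [hlen] at hL; omega
        by_cases h4 : l = []
        · refine ⟨[x], ?_, List.Palindrome.singleton x, by simp [h3, h4]⟩
          subst h4; exact (List.nil_sublist [x]).cons₂ x
        · obtain ⟨t, hts, htp, htl⟩ := ih (l.length - 1) (by omega)
          refine ⟨x :: (t ++ [x]), (hts.append (List.Sublist.refl [x])).cons₂ x,
            List.Palindrome.cons_concat x htp, ?_⟩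
          have : l.length ≠ 0 := by simpa using h4
          simp [htl, h3]; omega

-- the scan loop of A is the half-range palindrome test
theorem palScan_iff (l : List Int) : ∀ (d j : Nat), l.length - l.length / 2 - j = d →
    j < l.length - l.length / 2 →
    (palScan l j (j + 1) = true ↔
      ∀ m, j ≤ m → m < l.length - l.length / 2 →
        l.getD m 0 = l.getD (l.length - 1 - m) 0) := by
  intro d
  induction d with
  | zero => intro j h hj; omega
  | succ n ih =>
    intro j h hj
    have hjlen : j < l.length := by omega
    have hfd : PySem.Int.floordiv (l.length : Int) 2 = ((l.length / 2 : Nat) : Int) := by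
      exact_mod_cast PySem.Int.floordiv_natCast l.length 2
    have hcast : (l.length : Int) - ((j + 1 : Nat) : Int) = ((l.length - 1 - j : Nat) : Int) := by
      push_cast; omega
    rw [palScan, if_pos hjlen, hcast, PySem.List.pyGetD_natCast, PySem.List.pyGetD_natCast]
    by_cases heq : l.getD j 0 = l.getD (l.length - 1 - j) 0
    · rw [if_neg (by simpa using heq)]
      by_cases hlast : j + 1 = l.length - l.length / 2
      · rw [if_pos (by rw [hfd]; push_cast; omega)]
        simp only [true_iff]
        intro m hm1 hm2
        have : m = j := by omega
        rw [this]; exact heq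
      · rw [if_neg (by rw [hfd]; push_cast; omega)]
        rw [ih (j + 1) (by omega) (by omega)]
        constructor
        · intro hrec m hm1 hm2
          rcases Nat.eq_or_lt_of_le hm1 with hmj | hmj
          · rw [← hmj]; exact heq
          · exact hrec m hmj hm2
        · intro hall m hm1 hm2
          exact hall m (by omega) hm2
    · rw [if_pos (by simpa using heq)]
      constructor
      · intro hfalse; exact absurd hfalse (by simp)
      · intro hall; exact absurd (hall j (Nat.le_refl j) hj) heq

theorem palScan_nil : palScan [] 0 1 = false := by
  rw [palScan]; simp

theorem halfPal_iff_palindrome (l : List Int) (hl : l ≠ []) :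
    (∀ m, m < l.length - l.length / 2 → l.getD m 0 = l.getD (l.length - 1 - m) 0) ↔
      l.Palindrome := by
  have hlen : 0 < l.length := List.length_pos_iff.mpr hl
  rw [List.Palindrome.iff_reverse_eq]
  constructor
  · intro h
    apply List.ext_getElem (by simp)
    intro i h1 h2
    rw [List.getElem_reverse]
    by_cases hi : i < l.length - l.length / 2
    · have := h i hi
      rw [List.getD_eq_getElem l 0 (by omega), List.getD_eq_getElem l 0 (by omega)] at this
      exact this.symm
    · have hm : l.length - 1 - i < l.length - l.length / 2 := by omega
      have hgd := h (l.length - 1 - i) hm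
      have hco : l.length - 1 - (l.length - 1 - i) = i := by omega
      rw [hco] at hgd
      rw [List.getD_eq_getElem l 0 (by omega), List.getD_eq_getElem l 0 (by omega)] at hgd
      exact hgd
  · intro h m hm
    have hmlen : m < l.length := by omega
    have e1 : l[m]? = l[l.length - 1 - m]? := by
      conv_lhs => rw [← h]
      rw [List.getElem?_reverse hmlen]
    rw [List.getD_eq_getElem?_getD, List.getD_eq_getElem?_getD, e1]

theorem palScan_eq (l : List Int) :
    palScan l 0 1 = true ↔ (l ≠ [] ∧ l.Palindrome) := by
  by_cases hl : l = []
  · subst hl; rw [palScan_nil]; simp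
  · have hlen : 0 < l.length := List.length_pos_iff.mpr hl
    have hc : 0 < l.length - l.length / 2 := by omega
    rw [show (1 : Nat) = 0 + 1 from rfl,
      palScan_iff l (l.length - l.length / 2) 0 (by omega) hc]
    constructor
    · intro h
      exact ⟨hl, (halfPal_iff_palindrome l hl).mp (fun m hm => h m (Nat.zero_le m) hm)⟩
    · rintro ⟨-, hp⟩ m - hm
      exact (halfPal_iff_palindrome l hl).mpr hp m hm

-- the two Bool conditions agree in the main regime 1 ≤ num, len - num ≥ 2
theorem key_iff (data : List Int) (num : Int) (_hpre : num ≤ (data.length : Int))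
    (hnum : 1 ≤ num) (hlen2 : (2 : Int) ≤ (data.length : Int) - num) :
    ((PySem.List.pyRange 0 num 1).any (fun f =>
        (PySem.List.combinations data (((data.length : Int) - num + f).toNat)).any
          (fun c => palScan c 0 1)) = true)
      ↔ lpsAux data 0 (data.length - 1) ≥ (data.length : Int) - num := by
  have hdlen : 3 ≤ data.length := by omega
  have hne0 : data ≠ [] := by intro h; rw [h] at hdlen; simp at hdlen
  have hsegfull : seg data 0 (data.length - 1) = data := seg_full data hne0
  constructor
  · intro hA
    rw [List.any_eq_true] at hA
    obtain ⟨f, hf, hcany⟩ := hA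
    rw [List.any_eq_true] at hcany
    obtain ⟨c, hcmem, hscan⟩ := hcany
    have hfm : (0 : Int) ≤ f ∧ f < num := PySem.List.mem_pyRange_one.mp hf
    obtain ⟨hsub, hlenc⟩ := (PySem.List.mem_combinations_iff _ _ _).mp hcmem
    obtain ⟨-, hpal⟩ := (palScan_eq c).mp hscan
    have hup := lps_upper data 0 (data.length - 1) (by omega) c
      (by rw [hsegfull]; exact hsub) hpal
    have hcl : (c.length : Int) = (data.length : Int) - num + f := by
      rw [hlenc, Int.toNat_of_nonneg (by omega)]
    omega
  · intro hB
    obtain ⟨s, hsub, hpal, hlen⟩ := lps_achieved data 0 (data.length - 1) (by omega)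
    rw [hsegfull] at hsub
    have hL0 : ((((data.length : Int) - num).toNat : Int)) = (data.length : Int) - num :=
      Int.toNat_of_nonneg (by omega)
    have hle : ((data.length : Int) - num).toNat ≤ s.length := by omega
    obtain ⟨t, hts, htp, htl⟩ := pal_shrink hpal _ hle
    rw [List.any_eq_true]
    refine ⟨0, PySem.List.mem_pyRange_one.mpr ⟨le_refl 0, by omega⟩, ?_⟩
    rw [List.any_eq_true]
    refine ⟨t, (PySem.List.mem_combinations_iff _ _ _).mpr
      ⟨hts.trans hsub, by rw [htl]; norm_num⟩, ?_⟩
    rw [palScan_eq]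
    refine ⟨?_, htp⟩
    intro h
    rw [h] at htl
    simp at htl
    omega

theorem func_eq_alt (data : List Int) (num : Int) (_hpre : num ≤ (data.length : Int)) :
    func data num = func_alt data num := by
  rw [func, func_alt]
  simp only [result_eq data]
  by_cases hc1 : (data.length : Int) - num = 0 ∨ (data.length : Int) - num = 1
  · rw [if_pos hc1, if_pos hc1]
  · rw [if_neg hc1, if_neg hc1]
    by_cases hc2 : num ≤ 0
    · rw [PySem.List.pyRange_one_eq_nil hc2]
      simp [hc2]
    · rw [if_neg hc2]
      have hnum : 1 ≤ num := by omega
      have hlen2 : (2 : Int) ≤ (data.length : Int) - num := by omega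
      have key := key_iff data num _hpre hnum hlen2
      by_cases hB : lpsAux data 0 (data.length - 1) ≥ (data.length : Int) - num
      · rw [if_pos (key.mpr hB), if_pos hB]
      · rw [if_neg ?hA, if_neg hB]
        case hA =>
          intro h
          exact hB (key.mp h)

-- ===== VERDICT (by name: the statement is the Claim_ definition above) =====
theorem func_spec : Claim_equal_func := by
  intro data num _ hpre
  unfold Spec_func
  exact func_eq_alt data num hpre
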